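-- pv_equiv track=rewrite | github.com/jhsuwm/sprint2code | backend/agents/auto_fix_orchestrator.py | _prioritize_files
-- ===== SOURCE A (Python) =====
-- from typing import List, Dict, Any, Optional
--
-- def _prioritize_files(files_to_fix: Dict[str, Dict]) -> List[tuple]:
--     """
--     Prioritize files for fixing:
--     1. Dependencies (requirements.txt, package.json) - must be fixed first
--     2. Types/Models - needed by other files
--     3. Implementation files - can be fixed in parallel
--     """
--     dependency_files = []
--     type_files = []
--     implementation_files = []
--
--     for file_path, file_info in files_to_fix.items():
--         if file_path.endswith(('requirements.txt', 'package.json')):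
--             dependency_files.append((file_path, file_info))
--         elif '/types/' in file_path or '/models/' in file_path:
--             type_files.append((file_path, file_info))
--         else:
--             implementation_files.append((file_path, file_info))
--
--     # Return in priority order
--     return dependency_files + type_files + implementation_files
-- ===== SOURCE B (Python) =====
-- def _prioritize_files(files_to_fix):
--     """Same bucketed priority order via a key function and Python's stable sort."""
--     def priority(file_path):
--         if file_path.endswith(('requirements.txt', 'package.json')):
--             return 0
--         if '/types/' in file_path or '/models/' in file_path:
--             return 1
--         return 2
--     return sorted(files_to_fix.items(), key=lambda kv: priority(kv[0]))
-- ===== Notes on version B (the rewrite author's own statement) =====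
-- stated objective: idiomatic
-- what changed: Replaces the three hand-maintained bucket lists and their concatenation with a priority key function plus one stable sort, whose stability preserves dict order within each bucket.
import Mathlib
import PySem

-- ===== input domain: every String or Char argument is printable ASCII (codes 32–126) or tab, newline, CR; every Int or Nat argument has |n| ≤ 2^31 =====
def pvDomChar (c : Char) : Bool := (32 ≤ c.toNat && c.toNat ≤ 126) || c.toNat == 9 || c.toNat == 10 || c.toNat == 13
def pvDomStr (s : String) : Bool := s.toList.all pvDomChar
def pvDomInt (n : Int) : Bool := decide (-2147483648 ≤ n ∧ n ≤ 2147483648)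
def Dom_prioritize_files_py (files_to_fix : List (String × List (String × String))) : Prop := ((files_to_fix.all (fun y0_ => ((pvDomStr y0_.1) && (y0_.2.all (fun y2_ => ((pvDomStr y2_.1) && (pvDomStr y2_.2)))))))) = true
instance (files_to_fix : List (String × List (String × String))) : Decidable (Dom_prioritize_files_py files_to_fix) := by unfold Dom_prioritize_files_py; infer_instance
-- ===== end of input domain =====

-- B replaces A's three hand-maintained bucket lists with a priority key and one stable sort (more idiomatic, same result).


-- ===== PORT A =====
-- for-loop over the dict items appending to three bucket lists, then concatenation in priority order
def prioritize_files_py (files_to_fix : List (String × List (String × String))) : List (String × (List (String × String))) :=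
  let s := files_to_fix.foldl
    (fun (acc : List (String × List (String × String)) × List (String × List (String × String)) × List (String × List (String × String))) fp =>
      if PySem.Str.endswith fp.1 "requirements.txt" || PySem.Str.endswith fp.1 "package.json" then
        (acc.1 ++ [fp], acc.2.1, acc.2.2)
      else if PySem.Str.isIn "/types/" fp.1 || PySem.Str.isIn "/models/" fp.1 then
        (acc.1, acc.2.1 ++ [fp], acc.2.2)
      else
        (acc.1, acc.2.1, acc.2.2 ++ [fp]))
    ([], [], [])
  s.1 ++ s.2.1 ++ s.2.2

-- ===== PORT B =====
-- B's helper: priority(file_path), same if/elif precedence as A's branches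
def pvPriority (p : String) : Int :=
  if PySem.Str.endswith p "requirements.txt" || PySem.Str.endswith p "package.json" then 0
  else if PySem.Str.isIn "/types/" p || PySem.Str.isIn "/models/" p then 1
  else 2

def prioritize_files_py_alt (files_to_fix : List (String × List (String × String))) : List (String × (List (String × String))) :=
  PySem.List.sorted files_to_fix (fun kv => pvPriority kv.1) false

-- ===== PRECONDITION & SPEC =====
def Spec_prioritize_files_py (files_to_fix : List (String × List (String × String))) (out : List (String × (List (String × String)))) : Prop := out = prioritize_files_py_alt files_to_fix
instance (files_to_fix : List (String × List (String × String))) (out : List (String × (List (String × String)))) : Decidable (Spec_prioritize_files_py files_to_fix out) := by unfold Spec_prioritize_files_py; infer_instance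

-- ===== CLAIM (what is proved, stated in full; the proofs are below) =====
def Claim_equal_prioritize_files_py : Prop := ∀ (files_to_fix : List (String × List (String × String))), Dom_prioritize_files_py files_to_fix → Spec_prioritize_files_py files_to_fix (prioritize_files_py files_to_fix)

-- ===== LEMMAS AND PROOFS =====

-- pvPriority only takes the values 0, 1, 2
theorem pvPriority_cases (p : String) : pvPriority p = 0 ∨ pvPriority p = 1 ∨ pvPriority p = 2 := by
  unfold pvPriority; split_ifs <;> simp

-- insertBy skips a prefix no element of which x goes before
theorem insertBy_append_of_not_before {α : Type} (before : α → α → Bool) (x : α)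
    (as bs : List α) (h : ∀ a ∈ as, before x a = false) :
    PySem.List.insertBy before x (as ++ bs) = as ++ PySem.List.insertBy before x bs := by
  induction as with
  | nil => simp
  | cons a as ih =>
    have ha := h a (by simp)
    simp only [List.cons_append, PySem.List.insertBy, ha]
    simp only [Bool.false_eq_true, if_false]
    exact congrArg (a :: ·) (ih (fun a ha' => h a (by simp [ha'])))

-- insertBy puts x in front when x goes before every element
theorem insertBy_eq_cons_of_all_before {α : Type} (before : α → α → Bool) (x : α)
    (bs : List α) (h : ∀ b ∈ bs, before x b = true) :
    PySem.List.insertBy before x bs = x :: bs := by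
  cases bs with
  | nil => rfl
  | cons b bs => simp [PySem.List.insertBy, h b (by simp)]

-- the filters by priority k
def pvF (k : Int) (xs : List (String × List (String × String))) : List (String × List (String × String)) :=
  xs.filter (fun kv => pvPriority kv.1 = k)

-- B: the stable sort is the concatenation of the three priority filters
theorem sorted_eq_filters (xs : List (String × List (String × String))) :
    PySem.List.sorted xs (fun kv => pvPriority kv.1) false = pvF 0 xs ++ pvF 1 xs ++ pvF 2 xs := by
  rw [PySem.List.sorted_eq_foldl_insertBy]
  induction xs using List.reverseRecOn with
  | nil => rfl
  | append_singleton ys x ih =>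
    rw [List.foldl_append, List.foldl_cons, List.foldl_nil, ih]
    have hf : ∀ k : Int, pvF k (ys ++ [x]) = pvF k ys ++ if pvPriority x.1 = k then [x] else [] := by
      intro k; simp [pvF, List.filter_append]; split_ifs with h <;> simp [h]
    rcases pvPriority_cases x.1 with h | h | h
    · rw [List.append_assoc,
        insertBy_append_of_not_before _ _ (pvF 0 ys) _ (by
          intro a ha; simp only [pvF, List.mem_filter, decide_eq_true_eq] at ha
          simp [h, ha.2]),
        insertBy_eq_cons_of_all_before _ _ _ (by
          intro b hb; simp only [List.mem_append, pvF, List.mem_filter, decide_eq_true_eq] at hb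
          rcases hb with hb | hb <;> simp [h, hb.2])]
      simp [hf, h]
    · rw [List.append_assoc,
        insertBy_append_of_not_before _ _ (pvF 0 ys) _ (by
          intro a ha; simp only [pvF, List.mem_filter, decide_eq_true_eq] at ha
          simp [h, ha.2]),
        insertBy_append_of_not_before _ _ (pvF 1 ys) _ (by
          intro a ha; simp only [pvF, List.mem_filter, decide_eq_true_eq] at ha
          simp [h, ha.2]),
        insertBy_eq_cons_of_all_before _ _ _ (by
          intro b hb; simp only [pvF, List.mem_filter, decide_eq_true_eq] at hb
          simp [h, hb.2])]
      simp [hf, h]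
    · rw [PySem.List.insertBy_of_forall_not_before _ _ _ (by
        intro b hb
        simp only [List.mem_append, pvF, List.mem_filter, decide_eq_true_eq] at hb
        rcases hb with (hb | hb) | hb <;> simp [h, hb.2])]
      simp [hf, h]

-- A: the fold maintains the three filters of the processed prefix
theorem fold_eq_filters (xs : List (String × List (String × String)))
    (d t i : List (String × List (String × String))) :
    xs.foldl
      (fun (acc : List (String × List (String × String)) × List (String × List (String × String)) × List (String × List (String × String))) fp =>
        if PySem.Str.endswith fp.1 "requirements.txt" || PySem.Str.endswith fp.1 "package.json" then
          (acc.1 ++ [fp], acc.2.1, acc.2.2)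
        else if PySem.Str.isIn "/types/" fp.1 || PySem.Str.isIn "/models/" fp.1 then
          (acc.1, acc.2.1 ++ [fp], acc.2.2)
        else
          (acc.1, acc.2.1, acc.2.2 ++ [fp]))
      (d, t, i)
      = (d ++ pvF 0 xs, t ++ pvF 1 xs, i ++ pvF 2 xs) := by
  induction xs generalizing d t i with
  | nil => simp [pvF]
  | cons x xs ih =>
    rw [List.foldl_cons]
    by_cases h1 : (PySem.Str.endswith x.1 "requirements.txt" || PySem.Str.endswith x.1 "package.json") = true
    · have hp : pvPriority x.1 = 0 := by unfold pvPriority; rw [if_pos h1]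
      simp only [h1, if_true, ih]
      simp [pvF, hp]
    · by_cases h2 : (PySem.Str.isIn "/types/" x.1 || PySem.Str.isIn "/models/" x.1) = true
      · have hp : pvPriority x.1 = 1 := by unfold pvPriority; rw [if_neg h1, if_pos h2]
        simp only [h1, h2, if_true, if_false, Bool.false_eq_true, ih]
        simp [pvF, hp]
      · have hp : pvPriority x.1 = 2 := by unfold pvPriority; rw [if_neg h1, if_neg h2]
        simp only [h1, h2, if_false, Bool.false_eq_true, ih]
        simp [pvF, hp]

-- ===== VERDICT (by name: the statement is the Claim_ definition above) =====
theorem prioritize_files_py_spec : Claim_equal_prioritize_files_py := by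
  intro files _
  show prioritize_files_py files = prioritize_files_py_alt files
  rw [prioritize_files_py, prioritize_files_py_alt, sorted_eq_filters, fold_eq_filters]
  simp
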